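-- pv_equiv track=rewrite | github.com/qifanmaker/QFMblog | web.py | legal
-- ===== SOURCE A (Python) =====
-- def legal(string):
--     unl = {
--         "&":"&amp;",
--         "\"":"&quot;",
--     }
--     nl = {
--     }
--     for i in unl:
--         string = string.replace(i,unl[i])
--     for i in nl:
--         string = string.replace(i,nl[i])
--     return string
-- ===== SOURCE B (Python) =====
-- def legal(string):
--     # One left-to-right pass: map each character through the entity table
--     # instead of running a full-string replace per entity.
--     unl = {
--         "&": "&amp;",
--         "\"": "&quot;",
--     }
--     out = []
--     for c in string:
--         out.append(unl.get(c, c))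
--     return "".join(out)
-- ===== Notes on version B (the rewrite author's own statement) =====
-- stated objective: alternative
-- what changed: B makes a single left-to-right pass over the characters, mapping each one through the entity dict and joining the chunks, instead of A's two sequential full-string str.replace passes.
import Mathlib
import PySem

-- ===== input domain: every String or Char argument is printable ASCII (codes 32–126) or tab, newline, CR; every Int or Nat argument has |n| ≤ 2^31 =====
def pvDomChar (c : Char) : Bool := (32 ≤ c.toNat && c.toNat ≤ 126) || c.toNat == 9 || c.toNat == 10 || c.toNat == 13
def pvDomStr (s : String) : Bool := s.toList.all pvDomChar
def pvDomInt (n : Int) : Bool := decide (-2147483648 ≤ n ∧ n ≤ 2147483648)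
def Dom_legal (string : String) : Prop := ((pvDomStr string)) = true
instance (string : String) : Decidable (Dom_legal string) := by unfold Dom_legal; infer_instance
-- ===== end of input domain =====

-- B replaces A's two sequential full-string replace passes by one per-character pass over the string.

-- ===== PORT A =====
-- A: a dict of entities, then one full-string replace per key (the second dict is empty).
def legal (string : String) : String :=
  let unl : PySem.Dict String String := PySem.Dict.ofList [("&", "&amp;"), ("\"", "&quot;")]
  let nl : PySem.Dict String String := PySem.Dict.ofList []
  let string := unl.keys.foldl (fun s i => PySem.Str.replace s i (unl.getD i "")) string
  let string := nl.keys.foldl (fun s i => PySem.Str.replace s i (nl.getD i "")) string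
  string

-- ===== PORT B =====
-- B: one pass, each character mapped through the dict (default: itself), chunks joined.
def legal_alt (string : String) : String :=
  let unl : PySem.Dict Char String := PySem.Dict.ofList [('&', "&amp;"), ('"', "&quot;")]
  let out : List String := string.toList.foldl (fun out c => out ++ [unl.getD c (String.ofList [c])]) []
  PySem.Str.join "" out

-- ===== PRECONDITION & SPEC =====
def Spec_legal (string : String) (out : String) : Prop := out = legal_alt string
instance (string : String) (out : String) : Decidable (Spec_legal string out) := by unfold Spec_legal; infer_instance

-- ===== CLAIM (what is proved, stated in full; the proofs are below) =====
def Claim_equal_legal : Prop := ∀ (string : String), Dom_legal string → Spec_legal string (legal string)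

-- ===== LEMMAS AND PROOFS =====

-- Single-character replace is a per-character flatMap.
theorem replace_go_single (o : Char) (nw : List Char) (l : List Char) :
    ∀ (acc : List Char) (fuel : Nat), l.length ≤ fuel →
    PySem.Chars.replace.go [o] nw fuel l acc
      = acc.reverse ++ l.flatMap (fun c => if c = o then nw else [c]) := by
  induction l with
  | nil =>
      intro acc fuel _
      cases fuel <;> simp [PySem.Chars.replace.go]
  | cons c t ih =>
      intro acc fuel hf
      cases fuel with
      | zero => simp at hf
      | succ n =>
          simp only [PySem.Chars.replace.go]
          by_cases h : c = o
          · subst h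
            simp [List.isPrefixOf, ih _ n (by simpa using hf)]
          · have hp : [o].isPrefixOf (c :: t) = false := by
              simp [List.isPrefixOf, Ne.symm h]
            simp [hp, ih _ n (by simpa using hf), h]

theorem replace_single (o : Char) (nw : List Char) (l : List Char) :
    PySem.Chars.replace l [o] nw = l.flatMap (fun c => if c = o then nw else [c]) := by
  simp [PySem.Chars.replace, replace_go_single o nw l [] l.length (Nat.le_refl _)]

-- the per-character mapping B applies
def pvMap (c : Char) : List Char :=
  if c = '&' then "&amp;".toList else if c = '"' then "&quot;".toList else [c]

-- A's two replace passes, at the character level, equal one flatMap of pvMap.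
theorem two_pass_eq (l : List Char) :
    (l.flatMap (fun c => if c = '&' then "&amp;".toList else [c])).flatMap
      (fun c => if c = '"' then "&quot;".toList else [c]) = l.flatMap pvMap := by
  rw [List.flatMap_assoc]
  induction l with
  | nil => rfl
  | cons c t ih =>
      simp only [List.flatMap_cons, ih]
      congr 1
      by_cases h1 : c = '&'
      · subst h1; decide
      · by_cases h2 : c = '"'
        · subst h2; decide
        · simp [h1, h2, pvMap]

-- B's getD through the literal dict is pvMap (as a String per character).
theorem getD_eq_pvMap (c : Char) :
    ((PySem.Dict.ofList [('&', "&amp;"), ('"', "&quot;")] : PySem.Dict Char String).getD c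
      (String.ofList [c])).toList = pvMap c := by
  show ((((PySem.Dict.empty).insert '&' "&amp;").insert '"' "&quot;").getD c (String.ofList [c])).toList = _
  rw [PySem.Dict.getD_insert, PySem.Dict.getD_insert]
  unfold pvMap
  split_ifs with h1 h2 h3 <;>
    simp_all [PySem.Dict.getD, PySem.Dict.get?, PySem.Dict.empty]

-- B's append-a-chunk foldl is a map.
theorem foldl_append_map (h : Char → String) (l : List Char) :
    ∀ acc : List String, l.foldl (fun out c => out ++ [h c]) acc = acc ++ l.map h := by
  induction l with
  | nil => intro acc; simp
  | cons c t ih => intro acc; simp [ih]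

-- join "" = flatten
theorem join_empty_sep (parts : List (List Char)) :
    PySem.Chars.join [] parts = parts.flatten := by
  induction parts with
  | nil => rfl
  | cons h t ih =>
      cases t with
      | nil => simp [PySem.Chars.join, List.intercalate]
      | cons h2 t2 =>
          rw [PySem.Chars.join_cons_cons, ih]
          simp

theorem legal_toList (s : String) :
    (legal s).toList = s.toList.flatMap pvMap := by
  show (PySem.Str.replace (PySem.Str.replace s "&" "&amp;") "\"" "&quot;").toList = _
  rw [PySem.Str.toList_replace, PySem.Str.toList_replace]
  show PySem.Chars.replace (PySem.Chars.replace s.toList ['&'] _) ['"'] _ = _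
  rw [replace_single, replace_single]
  exact two_pass_eq s.toList

theorem legal_alt_toList (s : String) :
    (legal_alt s).toList = s.toList.flatMap pvMap := by
  show (PySem.Str.join "" (s.toList.foldl (fun out c => out ++ [(PySem.Dict.ofList [('&', "&amp;"), ('"', "&quot;")] : PySem.Dict Char String).getD c (String.ofList [c])]) [])).toList = _
  rw [foldl_append_map, PySem.Str.toList_join]
  show PySem.Chars.join [] _ = _
  rw [join_empty_sep]
  rw [List.nil_append, List.map_map, ← List.flatMap_def]
  exact List.flatMap_congr (fun c _ => getD_eq_pvMap c)

-- ===== VERDICT (by name: the statement is the Claim_ definition above) =====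
theorem legal_spec : Claim_equal_legal := by
  intro s _
  show legal s = legal_alt s
  have := (legal_toList s).trans (legal_alt_toList s).symm
  exact String.toList_inj.mp this
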